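-- pv_equiv track=rewrite | github.com/BenjaminPozo/Universidad-OtrosProyectos | 8vo Semestre/Redes/Tarea 7/router.py | filtrar_puertos_repetidos
-- ===== SOURCE A (Python) =====
-- def filtrar_puertos_repetidos(arr):
--     numeros_dict = {}
--
--     for elemento in arr:
--         numeros = elemento.split()
--         primer_numero = numeros[0]
--         if primer_numero in numeros_dict:
--             if len(elemento) < len(numeros_dict[primer_numero]):
--                 numeros_dict[primer_numero] = elemento
--         else:
--             numeros_dict[primer_numero] = elemento
--
--     return list(numeros_dict.values())
-- ===== SOURCE B (Python) =====
-- def filtrar_puertos_repetidos(arr):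
--     # Group elements by their first token (insertion order of keys preserved),
--     # then keep the earliest-shortest element of each group.
--     grupos = {}
--     for elemento in arr:
--         clave = elemento.split()[0]
--         grupos.setdefault(clave, []).append(elemento)
--     return [min(grupo, key=len) for grupo in grupos.values()]
-- ===== Notes on version B (the rewrite author's own statement) =====
-- stated objective: alternative
-- what changed: B first groups all elements by first token into lists of a dict built in one pass, then takes min(group, key=len) of each group, instead of A's running keep-the-shorter update of a single dict value; Pre_ only excludes inputs containing a whitespace-only/empty string, on which both A and B raise IndexError.
import Mathlib
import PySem

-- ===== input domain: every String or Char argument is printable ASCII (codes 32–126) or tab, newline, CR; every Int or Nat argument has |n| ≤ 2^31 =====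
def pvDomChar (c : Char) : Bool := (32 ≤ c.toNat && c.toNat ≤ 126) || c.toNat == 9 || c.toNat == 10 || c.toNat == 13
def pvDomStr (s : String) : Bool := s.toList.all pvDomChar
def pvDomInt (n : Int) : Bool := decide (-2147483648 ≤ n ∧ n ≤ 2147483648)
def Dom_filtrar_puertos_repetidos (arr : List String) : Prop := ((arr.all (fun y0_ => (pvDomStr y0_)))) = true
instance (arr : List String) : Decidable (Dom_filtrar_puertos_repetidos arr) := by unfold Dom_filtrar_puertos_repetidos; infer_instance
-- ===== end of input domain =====

-- B groups the elements by first token and then takes the (earliest) shortest of each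
-- group; same return value as A, a different decomposition ('alternative', not faster).

-- ===== PORT A =====
-- loop body of A's for-loop (the [] branch is A's IndexError on elemento.split(),
-- excluded by Pre_ below)
def pvStepA (numeros_dict : PySem.Dict String String) (elemento : String) :
    PySem.Dict String String :=
  match PySem.Str.split₀ elemento with
  | [] => numeros_dict
  | primer_numero :: _ =>
    if numeros_dict.contains primer_numero then
      if PySem.Str.len elemento < PySem.Str.len (numeros_dict.getD primer_numero "") then
        numeros_dict.insert primer_numero elemento
      else
        numeros_dict
    else
      numeros_dict.insert primer_numero elemento

def filtrar_puertos_repetidos (arr : List String) : List String :=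
  (arr.foldl pvStepA PySem.Dict.empty).values

-- ===== PORT B =====
-- loop body of B's grouping loop; grupos.setdefault(clave, []).append(elemento)
def pvStepB (grupos : PySem.Dict String (List String)) (elemento : String) :
    PySem.Dict String (List String) :=
  match PySem.Str.split₀ elemento with
  | [] => grupos
  | clave :: _ => grupos.modify clave [] (fun g => g ++ [elemento])

def filtrar_puertos_repetidos_alt (arr : List String) : List String :=
  ((arr.foldl pvStepB PySem.Dict.empty).values).filterMap
    (fun grupo => PySem.List.min? grupo PySem.Str.len)

-- ===== PRECONDITION & SPEC =====
-- Pre_ excludes exactly the inputs containing a whitespace-only (or empty) string: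
-- there elemento.split()[0] raises IndexError in Python A (and in B alike).
def Pre_filtrar_puertos_repetidos (arr : List String) : Prop :=
  ∀ s ∈ arr, PySem.Str.split₀ s ≠ []
instance (arr : List String) : Decidable (Pre_filtrar_puertos_repetidos arr) := by
  unfold Pre_filtrar_puertos_repetidos; infer_instance

def pvWitness_filtrar_puertos_repetidos : List String := ["1 a b", "2 c", "1 d"]

def Spec_filtrar_puertos_repetidos (arr : List String) (out : List String) : Prop :=
  out = filtrar_puertos_repetidos_alt arr
instance (arr : List String) (out : List String) :
    Decidable (Spec_filtrar_puertos_repetidos arr out) := by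
  unfold Spec_filtrar_puertos_repetidos; infer_instance

-- ===== CLAIM (what is proved, stated in full; the proofs are below) =====
def Claim_equal_filtrar_puertos_repetidos : Prop :=
  ∀ (arr : List String), Dom_filtrar_puertos_repetidos arr →
    Pre_filtrar_puertos_repetidos arr →
    Spec_filtrar_puertos_repetidos arr (filtrar_puertos_repetidos arr)

-- ===== LEMMAS AND PROOFS =====

-- the value A keeps for a key is the earliest shortest element of B's group for it
def pvPick (grp : List String) : String :=
  (PySem.List.min? grp PySem.Str.len).getD ""

def pvF (q : String × List String) : String × String := (q.1, pvPick q.2)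

theorem pvPick_singleton (e : String) : pvPick [e] = e := rfl

theorem pvPick_snoc (grp : List String) (e : String) (h : grp ≠ []) :
    pvPick (grp ++ [e]) =
      if PySem.Str.len e < PySem.Str.len (pvPick grp) then e else pvPick grp := by
  obtain ⟨m, hm⟩ : ∃ m, PySem.List.min? grp PySem.Str.len = some m := by
    cases hmm : PySem.List.min? grp PySem.Str.len with
    | none => exact absurd ((PySem.List.min?_eq_none_iff _ _).mp hmm) h
    | some m => exact ⟨m, rfl⟩
  have hsnoc : PySem.List.min? (grp ++ [e]) PySem.Str.len =
      if PySem.Str.len e < PySem.Str.len m then some e else some m := by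
    unfold PySem.List.min? at hm ⊢
    rw [List.foldl_append, hm]
    rfl
  unfold pvPick
  rw [hsnoc, hm]
  simp only [Option.getD_some]
  split_ifs <;> rfl

theorem pv_any_map (l : List (String × List String)) (p : String) :
    (l.map pvF).any (fun q => q.1 == p) = l.any (fun q => q.1 == p) := by
  induction l with
  | nil => rfl
  | cons q t ih => simp [pvF, ih]

theorem pv_find?_map (l : List (String × List String)) (p : String) :
    (l.map pvF).find? (fun q => q.1 == p) =
      (l.find? (fun q => q.1 == p)).map pvF := by
  induction l with
  | nil => rfl
  | cons q t ih =>
    by_cases h : (q.1 == p) = true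
    · simp [List.find?, pvF, h]
    · simp [List.find?, pvF, h, ih]

theorem pv_getD_map (l : List (String × List String)) (p : String) :
    (PySem.Dict.mk (l.map pvF)).getD p "" =
      pvPick ((PySem.Dict.mk l).getD p []) := by
  simp only [PySem.Dict.getD, PySem.Dict.get?, pv_find?_map]
  cases hf : l.find? (fun q => q.1 == p) <;> simp [pvF, pvPick, PySem.List.min?]

-- a map that rewrites only key-p entries is the identity when no key is p
theorem pv_map_id_of_no_key {ν : Type} (t : List (String × ν)) (p : String) (x : String × ν)
    (h : ∀ q ∈ t, ¬((q.1 == p) = true)) :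
    t.map (fun q => if q.1 == p then x else q) = t := by
  induction t with
  | nil => rfl
  | cons q t ih =>
    have hq := h q (by simp)
    simp only [List.map_cons, if_neg hq]
    rw [ih (fun r hr => h r (by simp [hr]))]

-- key step of the equivalence, at the items-list level, key already present
theorem pv_step_items (e p : String) (l : List (String × List String))
    (hnd : (l.map Prod.fst).Nodup) (hne : ∀ q ∈ l, q.2 ≠ [])
    (hc : l.any (fun q => q.1 == p) = true) :
    (if PySem.Str.len e <
          PySem.Str.len (pvPick ((PySem.Dict.mk l).getD p [])) then
        (l.map pvF).map (fun q => if q.1 == p then (p, e) else q)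
      else l.map pvF)
    = (l.map (fun q => if q.1 == p then (p, (PySem.Dict.mk l).getD p [] ++ [e]) else q)).map
        pvF := by
  induction l with
  | nil => simp at hc
  | cons q t ih =>
    by_cases hq : (q.1 == p) = true
    · have hqp : q.1 = p := by simpa using hq
      have hG : (PySem.Dict.mk (q :: t)).getD p [] = q.2 := by
        simp [PySem.Dict.getD, PySem.Dict.get?, List.find?, hq]
      have hpt : ∀ r ∈ t, ¬((r.1 == p) = true) := by
        intro r hr hrp
        have : q.1 ∈ t.map Prod.fst := by
          rw [hqp]
          exact List.mem_map.mpr ⟨r, hr, by simpa using hrp⟩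
        exact (List.nodup_cons.mp hnd).1 this
      have hida : (t.map pvF).map (fun r => if r.1 == p then (p, e) else r) = t.map pvF := by
        refine pv_map_id_of_no_key _ _ _ ?_
        intro r hr
        rcases List.mem_map.mp hr with ⟨r', hr', rfl⟩
        exact hpt r' hr'
      have hidb : t.map (fun r => if r.1 == p then (p, q.2 ++ [e]) else r) = t :=
        pv_map_id_of_no_key _ _ _ hpt
      have hq2 : q.2 ≠ [] := hne q (by simp)
      rw [hG]
      simp only [List.map_cons, if_pos hq, hida, hidb]
      rw [show pvF (p, q.2 ++ [e]) = (p, pvPick (q.2 ++ [e])) from rfl, pvPick_snoc q.2 e hq2]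
      simp only [pvF]
      split_ifs <;> simp [hqp]
    · have hG : (PySem.Dict.mk (q :: t)).getD p [] = (PySem.Dict.mk t).getD p [] := by
        simp [PySem.Dict.getD, PySem.Dict.get?, List.find?, hq]
      have hct : t.any (fun r => r.1 == p) = true := by
        rcases List.any_eq_true.mp hc with ⟨r, hr, hrp⟩
        rcases List.mem_cons.mp hr with rfl | hr'
        · exact absurd hrp hq
        · exact List.any_eq_true.mpr ⟨r, hr', hrp⟩
      have ih' := ih (List.nodup_cons.mp hnd).2 (fun r hr => hne r (by simp [hr])) hct
      rw [hG]
      have hqf : (pvF q).1 = q.1 := rfl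
      simp only [List.map_cons, hqf, if_neg hq]
      rw [← ih']
      split_ifs <;> simp [pvF]

-- single loop iteration: A's dict stays the pvF-image of B's dict
theorem pv_step_eq (e : String) (g : PySem.Dict String (List String))
    (hnd : (g.items.map Prod.fst).Nodup) (hne : ∀ q ∈ g.items, q.2 ≠ []) :
    pvStepA (PySem.Dict.mk (g.items.map pvF)) e =
      PySem.Dict.mk ((pvStepB g e).items.map pvF) := by
  unfold pvStepA pvStepB
  rcases hs : PySem.Str.split₀ e with _ | ⟨p, rest⟩
  · rfl
  · dsimp only
    have hcont : (PySem.Dict.mk (g.items.map pvF)).contains p = g.items.any (fun q => q.1 == p) := by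
      simp only [PySem.Dict.contains]
      exact pv_any_map g.items p
    by_cases hc : g.items.any (fun q => q.1 == p) = true
    · have hcont' : (PySem.Dict.mk (g.items.map pvF)).contains p = true := by rw [hcont]; exact hc
      have hcg : g.contains p = true := hc
      unfold PySem.Dict.modify
      have hinsB : (g.insert p (g.getD p [] ++ [e])).items =
          g.items.map (fun q => if q.1 == p then (p, g.getD p [] ++ [e]) else q) := by
        simp [PySem.Dict.insert, hcg]
      have hgetD : g.getD p [] = (PySem.Dict.mk g.items).getD p [] := rfl
      have hinsA : ((PySem.Dict.mk (g.items.map pvF)).insert p e).items =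
          (g.items.map pvF).map (fun q => if q.1 == p then (p, e) else q) := by
        simp [PySem.Dict.insert, hcont']
      rw [hcont', if_pos rfl]
      apply PySem.Dict.ext
      show (if PySem.Str.len e <
              PySem.Str.len ((PySem.Dict.mk (g.items.map pvF)).getD p "") then
            (PySem.Dict.mk (g.items.map pvF)).insert p e
          else PySem.Dict.mk (g.items.map pvF)).items =
          ((g.insert p (g.getD p [] ++ [e])).items.map pvF)
      rw [apply_ite PySem.Dict.items, hinsA, hinsB, pv_getD_map]
      exact pv_step_items e p g.items hnd hne hc
    · have hcont' : (PySem.Dict.mk (g.items.map pvF)).contains p = false := by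
        rw [hcont]; exact Bool.eq_false_iff.mpr hc
      have hcg : g.contains p = false := by
        simp only [PySem.Dict.contains]
        exact Bool.eq_false_iff.mpr hc
      have hfind : g.items.find? (fun q => q.1 == p) = none := by
        rw [List.find?_eq_none]
        intro q hq hqp
        exact hc (List.any_eq_true.mpr ⟨q, hq, hqp⟩)
      have hgd : g.getD p [] = [] := by
        simp [PySem.Dict.getD, PySem.Dict.get?, hfind]
      unfold PySem.Dict.modify
      rw [hgd, hcont']
      simp only [Bool.false_eq_true, if_false]
      apply PySem.Dict.ext
      have hinsB : (g.insert p ([] ++ [e])).items = g.items ++ [(p, [e])] := by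
        simp [PySem.Dict.insert, hcg]
      have hinsA : ((PySem.Dict.mk (g.items.map pvF)).insert p e).items =
          g.items.map pvF ++ [(p, e)] := by
        simp [PySem.Dict.insert, hcont']
      rw [hinsA, hinsB]
      simp [pvF, pvPick_singleton]

-- the grouping loop preserves key-nodup and group-nonemptiness
theorem pv_stepB_inv (e : String) (g : PySem.Dict String (List String))
    (hnd : (g.items.map Prod.fst).Nodup) (hne : ∀ q ∈ g.items, q.2 ≠ []) :
    (((pvStepB g e).items.map Prod.fst).Nodup) ∧ (∀ q ∈ (pvStepB g e).items, q.2 ≠ []) := by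
  unfold pvStepB
  rcases hs : PySem.Str.split₀ e with _ | ⟨p, rest⟩
  · exact ⟨hnd, hne⟩
  · dsimp only
    unfold PySem.Dict.modify
    by_cases hcg : g.contains p = true
    · have hins : (g.insert p (g.getD p [] ++ [e])).items =
          g.items.map (fun q => if q.1 == p then (p, g.getD p [] ++ [e]) else q) := by
        simp [PySem.Dict.insert, hcg]
      constructor
      · rw [hins]
        have : (g.items.map (fun q => if q.1 == p then (p, g.getD p [] ++ [e]) else q)).map
            Prod.fst = g.items.map Prod.fst := by
          rw [List.map_map]
          apply List.map_congr_left
          intro q _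
          by_cases hq : (q.1 == p) = true
          · simp [Function.comp, (by simpa using hq : q.1 = p)]
          · simp [Function.comp, hq]
        rw [this]; exact hnd
      · rw [hins]
        intro q hq
        rcases List.mem_map.mp hq with ⟨r, hr, rfl⟩
        by_cases hrp : (r.1 == p) = true
        · simp [hrp]
        · simpa [hrp] using hne r hr
    · have hcg' : g.contains p = false := Bool.eq_false_iff.mpr hcg
      have hins : (g.insert p (g.getD p [] ++ [e])).items = g.items ++ [(p, g.getD p [] ++ [e])] := by
        simp [PySem.Dict.insert, hcg']
      constructor
      · rw [hins, List.map_append]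
        refine List.Nodup.append hnd (by simp) ?_
        intro x hx hy
        simp only [List.map_cons, List.map_nil, List.mem_singleton] at hy
        have hany : g.items.any (fun q => q.1 == p) = false := hcg'
        rcases List.mem_map.mp hx with ⟨r, hr, rfl⟩
        exact (List.any_eq_false.mp hany r hr) (by simp [hy])
      · rw [hins]
        intro q hq
        rcases List.mem_append.mp hq with h | h
        · exact hne q h
        · simp only [List.mem_singleton] at h
          subst h
          simp
-- loop invariant over the whole list
theorem pv_fold_inv (arr : List String) :
    ∀ (g : PySem.Dict String (List String)),
      (g.items.map Prod.fst).Nodup → (∀ q ∈ g.items, q.2 ≠ []) →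
      (arr.foldl pvStepA (PySem.Dict.mk (g.items.map pvF))).items =
          (arr.foldl pvStepB g).items.map pvF
        ∧ ((arr.foldl pvStepB g).items.map Prod.fst).Nodup
        ∧ (∀ q ∈ (arr.foldl pvStepB g).items, q.2 ≠ []) := by
  induction arr with
  | nil => intro g hnd hne; exact ⟨rfl, hnd, hne⟩
  | cons e arr ih =>
    intro g hnd hne
    have hstep := pv_step_eq e g hnd hne
    have hinv := pv_stepB_inv e g hnd hne
    have := ih (pvStepB g e) hinv.1 hinv.2
    simp only [List.foldl_cons]
    rw [hstep]
    exact ⟨this.1, this.2.1, this.2.2⟩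

theorem pv_filterMap_min (l : List (String × List String)) (hne : ∀ q ∈ l, q.2 ≠ []) :
    (l.map Prod.snd).filterMap (fun grupo => PySem.List.min? grupo PySem.Str.len) =
      l.map (fun q => pvPick q.2) := by
  induction l with
  | nil => rfl
  | cons q t ih =>
    have hq : q.2 ≠ [] := hne q (by simp)
    rcases hm : PySem.List.min? q.2 PySem.Str.len with _ | m
    · exact absurd ((PySem.List.min?_eq_none_iff _ _).mp hm) hq
    · simp only [List.map_cons, List.filterMap_cons, hm]
      rw [ih (fun r hr => hne r (by simp [hr]))]
      simp [pvPick, hm]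

-- ===== VERDICT (by name: the statement is the Claim_ definition above) =====
theorem filtrar_puertos_repetidos_spec : Claim_equal_filtrar_puertos_repetidos := by
  intro arr _ _
  unfold Spec_filtrar_puertos_repetidos filtrar_puertos_repetidos filtrar_puertos_repetidos_alt
  have h := pv_fold_inv arr PySem.Dict.empty (by simp [PySem.Dict.empty]) (by simp [PySem.Dict.empty])
  have hempty : PySem.Dict.mk ((PySem.Dict.empty : PySem.Dict String (List String)).items.map pvF) =
      (PySem.Dict.empty : PySem.Dict String String) := rfl
  rw [hempty] at h
  rw [PySem.Dict.values, PySem.Dict.values, h.1]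
  rw [pv_filterMap_min _ h.2.2]
  simp [pvF, List.map_map, Function.comp]
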